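-- pv_equiv track=rewrite | github.com/Alex-bensimon/Projet_DataScienceTools | fonction_scraping_accueil.py | nb_page
-- ===== SOURCE A (Python) =====
-- def nb_page(number):
--     '''
--     Return the number of page.s to get
--
--     :param int number:
--     :return list nb_page: a list of numbers
--     :rtype: list of int
--     '''
--     i = 0
--     page = 0
--     nb_page = []
--     for i in range(number):
--         nb_page.append(page)
--         if i == 0:
--             page += 51
--         else:
--             page +=50
--
--     return nb_page
-- ===== SOURCE B (Python) =====
-- def nb_page(number):
--     '''Closed form: element 0 is 0; element k (k>=1) is 50*k + 1.'''
--     return [0 if k == 0 else 50 * k + 1 for k in range(number)]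
-- ===== Notes on version B (the rewrite author's own statement) =====
-- stated objective: simpler
-- what changed: Replaced the running-accumulator loop (page += 51 on the first step, += 50 after) with a direct index-to-value closed form 0, 50k+1.
import Mathlib
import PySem

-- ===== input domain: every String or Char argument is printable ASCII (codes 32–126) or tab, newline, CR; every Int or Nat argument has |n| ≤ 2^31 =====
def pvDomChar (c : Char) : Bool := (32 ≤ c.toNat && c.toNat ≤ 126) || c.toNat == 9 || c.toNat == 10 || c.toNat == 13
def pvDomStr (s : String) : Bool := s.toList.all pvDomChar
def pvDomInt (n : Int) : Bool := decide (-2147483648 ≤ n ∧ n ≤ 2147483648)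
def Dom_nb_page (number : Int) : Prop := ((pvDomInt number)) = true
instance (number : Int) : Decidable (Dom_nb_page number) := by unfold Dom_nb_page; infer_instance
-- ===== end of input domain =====

-- B replaces A's running-accumulator loop with a closed-form index-to-value formula (simpler).


-- ===== PORT A =====
-- literal port: running 'page' accumulator, +51 on the first iteration, +50 after
def nb_page (number : Int) : List Int :=
  let r := (PySem.List.pyRange 0 number 1).foldl
    (fun (st : Int × List Int) i =>
      let nb := st.2 ++ [st.1]
      if i == 0 then (st.1 + 51, nb) else (st.1 + 50, nb))
    (0, [])
  r.2

-- ===== PORT B =====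
-- closed form: element 0 is 0, element k (k ≥ 1) is 50*k + 1
def nb_page_alt (number : Int) : List Int :=
  (PySem.List.pyRange 0 number 1).map (fun k => if k == 0 then 0 else 50 * k + 1)

-- ===== PRECONDITION & SPEC =====
def Spec_nb_page (number : Int) (out : List Int) : Prop := out = nb_page_alt number
instance (number : Int) (out : List Int) : Decidable (Spec_nb_page number out) := by unfold Spec_nb_page; infer_instance

-- ===== CLAIM (what is proved, stated in full; the proofs are below) =====
def Claim_equal_nb_page : Prop := ∀ (number : Int), Dom_nb_page number → Spec_nb_page number (nb_page number)

-- ===== LEMMAS AND PROOFS =====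
-- loop invariant: after folding over range(m), the list is the closed-form map
-- and the running 'page' equals 0 for m = 0 and 50*m + 1 otherwise
theorem nb_page_fold_inv (m : Nat) :
    ((PySem.List.pyRange 0 (m : Int) 1).foldl
      (fun (st : Int × List Int) i =>
        let nb := st.2 ++ [st.1]
        if i == 0 then (st.1 + 51, nb) else (st.1 + 50, nb))
      (0, []))
    = (if (m : Int) == 0 then 0 else 50 * (m : Int) + 1,
       (PySem.List.pyRange 0 (m : Int) 1).map (fun k => if k == 0 then 0 else 50 * k + 1)) := by
  induction m with
  | zero => simp [PySem.List.pyRange_one_eq_nil]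
  | succ n ih =>
    have h : ((n : Int) : Int) ≤ ((n : Int) + 1) := by omega
    have hr : PySem.List.pyRange 0 ((n : Int) + 1) 1
        = PySem.List.pyRange 0 (n : Int) 1 ++ [(n : Int)] := by
      exact PySem.List.pyRange_one_succ_right (by omega)
    push_cast
    rw [hr, List.foldl_append, List.map_append, ih]
    rcases Nat.eq_zero_or_pos n with h0 | hpos
    · subst h0; simp
    · have hn0 : ((n : Int) == 0) = false := by
        simp; omega
      have hn1 : (((n : Int) + 1) == 0) = false := by
        simp; omega
      simp only [List.foldl_cons, List.foldl_nil, List.map_cons, List.map_nil, hn0, hn1,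
        Bool.false_eq_true, if_false]
      ring_nf

-- ===== VERDICT (by name: the statement is the Claim_ definition above) =====
theorem nb_page_spec : Claim_equal_nb_page := by
  unfold Claim_equal_nb_page
  intro number _
  unfold Spec_nb_page nb_page nb_page_alt
  rcases Int.lt_or_le number 0 with hneg | hpos
  · rw [PySem.List.pyRange_one_eq_nil (by omega)]
    simp
  · obtain ⟨m, rfl⟩ := Int.eq_ofNat_of_zero_le hpos
    simp only [nb_page_fold_inv]
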